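-- pv_equiv track=rewrite | github.com/IsrBekkhan/My_educational_work-PythonBasic | Module22/09_war_and_peace/main.py | sorter_func
-- ===== SOURCE A (Python) =====
-- def sorter_func(dictonary):
--     sorted_values = sorted(dictonary.values(), reverse=True)
--     sorted_dict = dict()
--
--     for value in sorted_values:
--         for key in dictonary:
--             if dictonary[key] == value:
--                 sorted_dict[key] = value
--                 break
--
--
--     return sorted_dict
-- ===== SOURCE B (Python) =====
-- def sorter_func(dictonary):
--     # one pass: value -> first key carrying it; then sort the distinct values descending
--     first_key = {}
--     for key, value in dictonary.items():
--         if value not in first_key: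
--             first_key[value] = key
--     result = {}
--     for value in sorted(first_key, reverse=True):
--         result[first_key[value]] = value
--     return result
-- ===== Notes on version B (the rewrite author's own statement) =====
-- stated objective: alternative
-- what changed: replaces the nested scan (for each sorted value, rescan the whole dict for its first key) by a single pass building a value-to-first-key map followed by one sort of the distinct values
import Mathlib
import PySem

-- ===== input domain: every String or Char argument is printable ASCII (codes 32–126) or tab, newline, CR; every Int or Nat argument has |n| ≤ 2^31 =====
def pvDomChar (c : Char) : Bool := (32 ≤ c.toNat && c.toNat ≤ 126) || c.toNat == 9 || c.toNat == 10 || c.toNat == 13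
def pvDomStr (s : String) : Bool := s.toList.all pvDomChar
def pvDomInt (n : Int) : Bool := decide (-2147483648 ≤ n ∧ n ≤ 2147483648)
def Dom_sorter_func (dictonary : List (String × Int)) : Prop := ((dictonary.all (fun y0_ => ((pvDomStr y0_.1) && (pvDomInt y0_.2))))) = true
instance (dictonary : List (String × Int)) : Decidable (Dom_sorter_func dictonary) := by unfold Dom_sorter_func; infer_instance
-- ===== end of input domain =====

-- B replaces A's nested rescans (one scan of the dict per sorted value) by a single value→first-key pass plus one sort of the distinct values.

-- ===== PORT A =====
-- inner loop: 'for key in dictonary: if dictonary[key] == value: sorted_dict[key] = value; break'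
def sorterInner (d : PySem.Dict String Int) (keys : List String) (sd : PySem.Dict String Int) (value : Int) : PySem.Dict String Int :=
  match keys with
  | [] => sd
  | k :: rest => if d.get? k = some value then sd.insert k value else sorterInner d rest sd value

def sorter_func (dictonary : List (String × Int)) : List (String × Int) :=
  let d : PySem.Dict String Int := PySem.Dict.mk dictonary
  let sorted_values := PySem.List.sorted d.values (fun x => x) true
  (sorted_values.foldl (fun sd value => sorterInner d d.keys sd value) PySem.Dict.empty).items

-- ===== PORT B =====
def sorter_func_alt (dictonary : List (String × Int)) : List (String × Int) :=
  let first_key : PySem.Dict Int String :=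
    dictonary.foldl (fun fk kv => if fk.contains kv.2 then fk else fk.insert kv.2 kv.1) PySem.Dict.empty
  -- 'first_key[value]' never misses (value ranges over first_key's keys); getD "" ports that always-successful lookup
  ((PySem.List.sorted first_key.keys (fun x => x) true).foldl
      (fun r v => r.insert (first_key.getD v "") v) PySem.Dict.empty).items

-- ===== PRECONDITION & SPEC =====
-- The Python argument is a dict, whose keys are necessarily distinct; an association list with a
-- duplicated key does not denote any dict A can receive, so those lists are excluded.
def Pre_sorter_func (dictonary : List (String × Int)) : Prop := (dictonary.map Prod.fst).Nodup
instance (dictonary : List (String × Int)) : Decidable (Pre_sorter_func dictonary) := by unfold Pre_sorter_func; infer_instance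
def pvWitness_sorter_func : (List (String × Int)) := [("a", 2), ("b", 1), ("c", 2)]

def Spec_sorter_func (dictonary : List (String × Int)) (out : List (String × Int)) : Prop := out = sorter_func_alt dictonary
instance (dictonary : List (String × Int)) (out : List (String × Int)) : Decidable (Spec_sorter_func dictonary out) := by unfold Spec_sorter_func; infer_instance

-- ===== CLAIM (what is proved, stated in full; the proofs are below) =====
def Claim_equal_sorter_func : Prop := ∀ (dictonary : List (String × Int)), Dom_sorter_func dictonary → Pre_sorter_func dictonary → Spec_sorter_func dictonary (sorter_func dictonary)

-- ===== LEMMAS AND PROOFS =====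
def pvFirstKey (l : List (String × Int)) (v : Int) : String :=
  ((l.find? (fun kv => kv.2 == v)).map Prod.fst).getD ""

theorem pvFirstKey_spec (l : List (String × Int)) (v : Int) (hv : v ∈ l.map Prod.snd) :
    (pvFirstKey l v, v) ∈ l := by
  obtain ⟨kv, hkv, hkveq⟩ := List.mem_map.mp hv
  have hex : ∃ x ∈ l, (fun kv => kv.2 == v) x = true := ⟨kv, hkv, by simp [hkveq]⟩
  obtain ⟨kv0, hfind⟩ := Option.isSome_iff_exists.mp (List.find?_isSome.mpr hex)
  have h1 := List.mem_of_find?_eq_some hfind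
  have h2 := List.find?_some hfind
  simp only [beq_iff_eq] at h2
  have : pvFirstKey l v = kv0.1 := by simp [pvFirstKey, hfind]
  rw [this, ← h2]
  exact h1

theorem pvFirstKey_inj (l : List (String × Int)) (hnd : (l.map Prod.fst).Nodup)
    (u v : Int) (hu : u ∈ l.map Prod.snd) (hv : v ∈ l.map Prod.snd)
    (h : pvFirstKey l u = pvFirstKey l v) : u = v := by
  have hknd : (PySem.Dict.mk l).keys.Nodup := by simpa [PySem.Dict.keys_mk] using hnd
  have h1 := PySem.Dict.get?_of_mem_items (PySem.Dict.mk l) (pvFirstKey_spec l u hu) hknd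
  have h2 := PySem.Dict.get?_of_mem_items (PySem.Dict.mk l) (pvFirstKey_spec l v hv) hknd
  rw [h] at h1
  rw [h1] at h2
  exact Option.some.inj h2
theorem innerScan_eq (l : List (String × Int)) (hnd : (l.map Prod.fst).Nodup) :
    ∀ (rest : List (String × Int)), (∀ kv ∈ rest, kv ∈ l) →
    ∀ (sd : PySem.Dict String Int) (v : Int),
    sorterInner (PySem.Dict.mk l) (rest.map Prod.fst) sd v =
      (match rest.find? (fun kv => kv.2 == v) with
       | some kv => sd.insert kv.1 v
       | none => sd) := by
  intro rest
  induction rest with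
  | nil => intro _ sd v; simp [sorterInner]
  | cons kv rest ih =>
    intro hsub sd v
    have hknd : (PySem.Dict.mk l).keys.Nodup := by simpa [PySem.Dict.keys_mk] using hnd
    have hget : (PySem.Dict.mk l).get? kv.1 = some kv.2 :=
      PySem.Dict.get?_of_mem_items _ (by simpa using hsub kv (by simp)) hknd
    by_cases hv : kv.2 = v
    · simp [sorterInner, hget, hv]
    · have : ¬ ((PySem.Dict.mk l).get? kv.1 = some v) := by simp [hget, hv]
      simp only [List.map_cons, sorterInner, this, if_false, List.find?_cons]
      have : (kv.2 == v) = false := by simpa using hv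
      rw [this]
      exact ih (fun x hx => hsub x (by simp [hx])) sd v
theorem foldl_insert_items (f : Int → String) :
    ∀ (S : List Int) (acc : PySem.Set Int),
    (∀ u, (u ∈ acc ∨ u ∈ S) → ∀ w, (w ∈ acc ∨ w ∈ S) → f u = f w → u = w) →
    (S.foldl (fun sd v => sd.insert (f v) v)
        (PySem.Dict.mk (acc.map (fun v => (f v, v))))).items
      = (PySem.Set.update acc S).map (fun v => (f v, v)) := by
  intro S
  induction S with
  | nil => intro acc _; simp [PySem.Set.update]
  | cons v rest ih =>
    intro acc hinj
    have hkeys : (PySem.Dict.mk (acc.map (fun v => (f v, v)))).keys = acc.map f := by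
      simp [PySem.Dict.keys_mk]
    by_cases hv : v ∈ acc
    · have hc : (PySem.Dict.mk (acc.map (fun v => (f v, v)))).contains (f v) = true := by
        rw [PySem.Dict.contains_iff_mem_keys, hkeys]
        exact List.mem_map_of_mem hv
      have hins : ((PySem.Dict.mk (acc.map (fun v => (f v, v)))).insert (f v) v) =
          PySem.Dict.mk (acc.map (fun v => (f v, v))) := by
        apply PySem.Dict.ext
        rw [PySem.Dict.items_insert_of_contains _ _ hc]
        show (acc.map (fun v => (f v, v))).map _ = acc.map (fun v => (f v, v))
        rw [List.map_map]
        apply List.map_congr_left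
        intro u hu
        by_cases he : f u = f v
        · have : u = v := hinj u (Or.inl hu) v (Or.inl hv) he
          simp [this]
        · simp [Function.comp, he]
      rw [List.foldl_cons, hins, PySem.Set.update_cons, PySem.Set.add_of_mem hv]
      exact ih acc (fun u hu w hw h => hinj u (by tauto) w (by tauto) h)
    · have hc : (PySem.Dict.mk (acc.map (fun v => (f v, v)))).contains (f v) = false := by
        rw [← Bool.not_eq_true, PySem.Dict.contains_iff_mem_keys, hkeys]
        intro hmem
        obtain ⟨u, hu, he⟩ := List.mem_map.mp hmem
        exact hv (hinj u (Or.inl hu) v (Or.inr (by simp)) he ▸ hu)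
      have hins : ((PySem.Dict.mk (acc.map (fun v => (f v, v)))).insert (f v) v) =
          PySem.Dict.mk ((acc ++ [v]).map (fun v => (f v, v))) := by
        apply PySem.Dict.ext
        rw [PySem.Dict.items_insert_of_not_contains _ _ hc]
        simp
      rw [List.foldl_cons, hins, PySem.Set.update_cons, PySem.Set.add_of_not_mem hv]
      have := ih (acc ++ [v]) ?_
      · exact this
      · intro u hu w hw h
        apply hinj u ?_ w ?_ h
        · rcases hu with hu | hu
          · rcases List.mem_append.mp hu with h' | h'
            · exact Or.inl h'
            · simp at h'; simp [h']
          · exact Or.inr (by simp [hu])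
        · rcases hw with hw | hw
          · rcases List.mem_append.mp hw with h' | h'
            · exact Or.inl h'
            · simp at h'; simp [h']
          · exact Or.inr (by simp [hw])
theorem fk_get? (l : List (String × Int)) :
    ∀ (fk : PySem.Dict Int String) (v : Int),
    (l.foldl (fun fk kv => if fk.contains kv.2 then fk else fk.insert kv.2 kv.1) fk).get? v =
      if fk.contains v then fk.get? v else (l.find? (fun kv => kv.2 == v)).map Prod.fst := by
  induction l with
  | nil =>
    intro fk v
    by_cases h : fk.contains v = true
    · simp [h]
    · simp only [Bool.not_eq_true] at h
      simp [h, (PySem.Dict.get?_eq_none_iff_contains fk v).mpr h]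
  | cons kv l ih =>
    intro fk v
    rw [List.foldl_cons]
    by_cases hc : fk.contains kv.2 = true
    · rw [if_pos hc, ih]
      by_cases hv : kv.2 = v
      · rw [← hv] at *
        simp [hc]
      · have : (kv.2 == v) = false := by simpa using hv
        simp [this]
    · simp only [Bool.not_eq_true] at hc
      rw [if_neg (by simp [hc]), ih]
      by_cases hv : v = kv.2
      · subst hv
        rw [if_pos (by simp), PySem.Dict.get?_insert_self,
          if_neg (by simp [hc])]
        simp [List.find?_cons_of_pos]
      · rw [PySem.Dict.contains_insert, PySem.Dict.get?_insert_of_ne (hne := hv)]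
        have : (v == kv.2) = false := by simpa using hv
        rw [this, Bool.false_or, List.find?_cons_of_neg (by simpa using fun h => hv h.symm)]
theorem fk_keys (l : List (String × Int)) :
    ∀ (fk : PySem.Dict Int String),
    (l.foldl (fun fk kv => if fk.contains kv.2 then fk else fk.insert kv.2 kv.1) fk).keys =
      PySem.Set.update fk.keys (l.map Prod.snd) := by
  induction l with
  | nil => intro fk; simp [PySem.Set.update]
  | cons kv l ih =>
    intro fk
    rw [List.foldl_cons, List.map_cons, PySem.Set.update_cons]
    by_cases hc : fk.contains kv.2 = true
    · rw [if_pos hc, ih, PySem.Set.add_of_mem ((PySem.Dict.contains_iff_mem_keys fk kv.2).mp hc)]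
    · simp only [Bool.not_eq_true] at hc
      rw [if_neg (by simp [hc]), ih, PySem.Dict.keys_insert_of_not_contains _ _ hc,
        PySem.Set.add_of_not_mem (fun h => by simp [(PySem.Dict.contains_iff_mem_keys fk kv.2).mpr h] at hc)]
theorem ofList_sublist {α : Type} [BEq α] [LawfulBEq α] (xs : List α) :
    (PySem.Set.ofList xs).Sublist xs := by
  induction xs using List.reverseRecOn with
  | nil => simp [PySem.Set.ofList]
  | append_singleton xs x ih =>
    rw [PySem.Set.ofList_append_singleton, PySem.Set.add_eq_ite]
    by_cases h : x ∈ PySem.Set.ofList xs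
    · exact (if_pos h) ▸ ih.trans (List.sublist_append_left xs [x])
    · rw [if_neg h]
      exact List.Sublist.append ih (List.Sublist.refl [x])

-- ===== VERDICT (by name: the statement is the Claim_ definition above) =====
theorem sorter_func_spec : Claim_equal_sorter_func := by
  intro l _ hnd
  unfold Spec_sorter_func sorter_func sorter_func_alt
  simp only [PySem.Dict.keys_mk, PySem.Dict.values_mk]
  set vals := l.map Prod.snd with hvals
  set S1 := PySem.List.sorted vals (fun x => x) true with hS1
  -- first_key characterization
  set fk := l.foldl (fun fk kv => if fk.contains kv.2 then fk else fk.insert kv.2 kv.1)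
      (PySem.Dict.empty : PySem.Dict Int String) with hfk
  have hfkkeys : fk.keys = PySem.Set.ofList vals := by
    rw [hfk, fk_keys, PySem.Dict.keys_empty, PySem.Set.update_nil_left]
  have hfkg : ∀ v, fk.getD v "" = pvFirstKey l v := by
    intro v
    rw [PySem.Dict.getD_eq_get?_getD, hfk, fk_get?]
    simp [PySem.Dict.contains_empty, pvFirstKey]
  set S2 := PySem.List.sorted fk.keys (fun x => x) true with hS2
  -- A's foldl body = insert of (pvFirstKey v, v) on members of S1
  have hA : (S1.foldl (fun sd value => sorterInner (PySem.Dict.mk l) (l.map Prod.fst) sd value)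
      PySem.Dict.empty).items = (PySem.Set.ofList S1).map (fun v => (pvFirstKey l v, v)) := by
    rw [PySem.List.foldl_congr_mem _ _ (fun sd v => sd.insert (pvFirstKey l v) v) _ ?_]
    · have := foldl_insert_items (pvFirstKey l) S1 [] ?_
      · simpa [PySem.Set.update_nil_left] using this
      · intro u hu w hw h
        simp only [List.mem_nil_iff, false_or] at hu hw
        exact pvFirstKey_inj l hnd u w ((PySem.List.mem_sorted _ _ _ _).mp hu)
          ((PySem.List.mem_sorted _ _ _ _).mp hw) h
    · intro sd v hv
      have hmem : v ∈ vals := (PySem.List.mem_sorted _ _ _ _).mp hv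
      obtain ⟨kv, hkv, hkveq⟩ := List.mem_map.mp hmem
      have hex : ∃ x ∈ l, (fun kv => kv.2 == v) x = true := ⟨kv, hkv, by simpa using hkveq⟩
      obtain ⟨kv0, hfind⟩ := Option.isSome_iff_exists.mp (List.find?_isSome.mpr hex)
      have hpk : pvFirstKey l v = kv0.1 := by
        unfold pvFirstKey; rw [hfind]; rfl
      rw [innerScan_eq l hnd l (fun kv h => h) sd v, hfind]
      simp [hpk]
  -- B's foldl
  have hB : (S2.foldl (fun r v => r.insert (fk.getD v "") v) PySem.Dict.empty).items
      = (PySem.Set.ofList S2).map (fun v => (pvFirstKey l v, v)) := by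
    have hbody : (fun (r : PySem.Dict String Int) v => r.insert (fk.getD v "") v)
        = fun r v => r.insert (pvFirstKey l v) v := by
      funext r v; rw [hfkg]
    rw [hbody]
    have := foldl_insert_items (pvFirstKey l) S2 [] ?_
    · simpa [PySem.Set.update_nil_left] using this
    · intro u hu w hw h
      simp only [List.mem_nil_iff, false_or] at hu hw
      have hu' : u ∈ vals := by
        have := (PySem.List.mem_sorted _ _ _ _).mp hu
        rw [hfkkeys] at this
        exact (PySem.Set.mem_ofList _ _).mp this
      have hw' : w ∈ vals := by
        have := (PySem.List.mem_sorted _ _ _ _).mp hw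
        rw [hfkkeys] at this
        exact (PySem.Set.mem_ofList _ _).mp this
      exact pvFirstKey_inj l hnd u w hu' hw' h
  -- the two dedup'd value sequences coincide
  have hS2nd : S2.Nodup := by
    have := PySem.List.sorted_perm fk.keys (fun x : Int => x) true
    exact this.nodup_iff.mpr (hfkkeys ▸ PySem.Set.nodup_ofList vals)
  have hkey : S2 = PySem.Set.ofList S1 := by
    rw [hS2, hfkkeys]
    apply PySem.List.sorted_rev_eq_of_perm_of_pairwise_gt
    · apply (List.perm_ext_iff_of_nodup (PySem.Set.nodup_ofList _) (PySem.Set.nodup_ofList _)).mpr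
      intro x
      rw [PySem.Set.mem_ofList, PySem.Set.mem_ofList, PySem.List.mem_sorted]
    · have hsub := ofList_sublist S1
      have hle : S1.Pairwise (fun a b => b ≤ a) := PySem.List.sorted_pairwise_rev vals (fun x => x)
      have h1 : (PySem.Set.ofList S1).Pairwise (fun a b : Int => b ≤ a) := hle.sublist hsub
      have h2 : (PySem.Set.ofList S1).Pairwise (fun a b : Int => a ≠ b) := PySem.Set.nodup_ofList S1
      exact (h1.and h2).imp (fun {a b} h => h.1.lt_of_ne h.2.symm)
  rw [hA, hB, hkey, PySem.Set.ofList_ofList]
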